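-- pv_equiv track=rewrite | github.com/Albertree/ARC_Fundamentals | components/components.py | object_colcoord_to_colorgrid
-- ===== SOURCE A (Python) =====
-- def object_colcoord_to_colorgrid(object):
--     # return a list of lists, each list has a color value of a pixel
--     object = list(object)
--
--     max_col = 0
--     max_row = 0
--     min_col = 100
--     min_row = 100
--     for n in range(len(object)):
--         if object[n][1][0] > max_col:
--             max_col = object[n][1][0]
--         if object[n][1][1] > max_row:
--             max_row = object[n][1][1]
--
--         if object[n][1][0] < min_col:
--             min_col = object[n][1][0]
--         if object[n][1][1] < min_row:
--             min_row = object[n][1][1]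
--
--     if min_col == 100:
--         min_col = max_col
--     if min_row == 100:
--         min_row = max_row
--
--     if min_col == 0:
--         col_move = 0
--     else:
--         col_move = min_col
--
--     if min_row == 0:
--         row_move = 0
--     else:
--         row_move = min_row
--
--     colorgrid = [[12 for j in range(max_row - min_row + 1)] for i in range(max_col - min_col + 1)]
--     for n in range(len(object)):
--         colorgrid[object[n][1][0]-(col_move)][object[n][1][1]-(row_move)] = object[n][0]
--     return colorgrid
-- ===== SOURCE B (Python) =====
-- def object_colcoord_to_colorgrid(object):
--     object = list(object)
--     cols = [o[1][0] for o in object]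
--     rows = [o[1][1] for o in object]
--     max_col = max([0] + cols)
--     max_row = max([0] + rows)
--     min_col = min([100] + cols)
--     min_row = min([100] + rows)
--     if min_col == 100:
--         min_col = max_col
--     if min_row == 100:
--         min_row = max_row
--     height = max_col - min_col + 1
--     width = max_row - min_row + 1
--     byrow = {}
--     for color, (c, r) in object:
--         byrow.setdefault(c - min_col, {})[r - min_row] = color
--     grid = []
--     for i in range(height):
--         row = [12] * width
--         for j, color in byrow.get(i, {}).items():
--             if 0 <= j < width:
--                 row[j] = color
--         grid.append(row)
--     return grid
-- ===== Notes on version B (the rewrite author's own statement) =====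
-- stated objective: alternative
-- what changed: Replaces A's four-way running max/min loop and prefill-then-scatter mutation of a 2D grid with max/min over the coordinate lists (sentinels kept), one pass grouping colors into a per-row dict keyed by shifted coordinates, and an emit loop that patches each C-allocated default row ([12]*width) from its dict, dropping out-of-grid keys instead of letting them wrap; the bulk row allocation replaces A's per-cell comprehension prefill (the measured constant-factor speedup).
-- outside the precondition, e.g. on object_colcoord_to_colorgrid([(5, (101, 0)), (7, (100, 0))]): A returns [[7]], B returns [[5]]; on object_colcoord_to_colorgrid([(3, (100, 5)), (3, (101, 5))]): A returns [[3]], B returns [[3]]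
import Mathlib
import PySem

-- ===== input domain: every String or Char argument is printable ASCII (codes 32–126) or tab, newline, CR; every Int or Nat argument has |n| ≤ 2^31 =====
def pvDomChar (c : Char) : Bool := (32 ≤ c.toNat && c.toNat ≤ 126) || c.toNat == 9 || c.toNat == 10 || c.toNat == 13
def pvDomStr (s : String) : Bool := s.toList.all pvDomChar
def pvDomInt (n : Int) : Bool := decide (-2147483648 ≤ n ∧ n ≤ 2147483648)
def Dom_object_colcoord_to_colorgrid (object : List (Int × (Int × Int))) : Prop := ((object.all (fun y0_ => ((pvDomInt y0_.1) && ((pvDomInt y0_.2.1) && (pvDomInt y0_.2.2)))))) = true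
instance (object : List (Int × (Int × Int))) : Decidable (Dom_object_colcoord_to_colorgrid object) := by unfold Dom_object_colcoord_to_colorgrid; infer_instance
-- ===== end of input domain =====

-- B replaces A's four-way running bounds loop and prefill-then-scatter 2D mutation with max/min
-- over the coordinate lists and a per-row grouping dict patched into default rows (objective:
-- alternative). Equivalence is about the return value only.

-- ===== PORT A =====
-- Python 'colorgrid[i][j] = v' (negative indices wrap; out of range = IndexError = none); exact:
-- reads row i with pyGet?, writes cell j with pySet?, writes row back with pySet?.
def pySetCell (g : List (List Int)) (i j v : Int) : Option (List (List Int)) :=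
  match PySem.List.pyGet? g i with
  | none => none
  | some row =>
    match PySem.List.pySet? row j v with
    | none => none
    | some row' => PySem.List.pySet? g i row'

def object_colcoord_to_colorgrid (object : List (Int × (Int × Int))) : List (List Int) :=
  -- for n in range(len(object)): the four running max/min updates
  let st : Int × Int × Int × Int :=
    (PySem.List.pyRange 0 (PySem.List.len object) 1).foldl
      (fun (st : Int × Int × Int × Int) n =>
        let p := PySem.List.pyGetD object n (0, (0, 0))
        let max_col := if p.2.1 > st.1 then p.2.1 else st.1
        let max_row := if p.2.2 > st.2.1 then p.2.2 else st.2.1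
        let min_col := if p.2.1 < st.2.2.1 then p.2.1 else st.2.2.1
        let min_row := if p.2.2 < st.2.2.2 then p.2.2 else st.2.2.2
        (max_col, max_row, min_col, min_row))
      (0, 0, 100, 100)
  let max_col := st.1
  let max_row := st.2.1
  let min_col := if st.2.2.1 = 100 then max_col else st.2.2.1
  let min_row := if st.2.2.2 = 100 then max_row else st.2.2.2
  let col_move := if min_col = 0 then 0 else min_col
  let row_move := if min_row = 0 then 0 else min_row
  let colorgrid : List (List Int) :=
    (PySem.List.pyRange 0 (max_col - min_col + 1) 1).map (fun _ =>
      (PySem.List.pyRange 0 (max_row - min_row + 1) 1).map (fun _ => (12 : Int)))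
  -- for n in range(len(object)): colorgrid[..][..] = color  (none = IndexError, outside Pre_)
  let res : Option (List (List Int)) :=
    (PySem.List.pyRange 0 (PySem.List.len object) 1).foldl
      (fun acc n =>
        let p := PySem.List.pyGetD object n (0, (0, 0))
        acc.bind (fun g => pySetCell g (p.2.1 - col_move) (p.2.2 - row_move) p.1))
      (some colorgrid)
  res.getD []

-- ===== PORT B =====
def object_colcoord_to_colorgrid_alt (object : List (Int × (Int × Int))) : List (List Int) :=
  let cols := object.map (fun o => o.2.1)
  let rows := object.map (fun o => o.2.2)
  let max_col := (PySem.List.max? ((0 : Int) :: cols) (fun x => x)).getD 0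
  let max_row := (PySem.List.max? ((0 : Int) :: rows) (fun x => x)).getD 0
  let min_col0 := (PySem.List.min? ((100 : Int) :: cols) (fun x => x)).getD 0
  let min_row0 := (PySem.List.min? ((100 : Int) :: rows) (fun x => x)).getD 0
  let min_col := if min_col0 = 100 then max_col else min_col0
  let min_row := if min_row0 = 100 then max_row else min_row0
  let height := max_col - min_col + 1
  let width := max_row - min_row + 1
  -- byrow.setdefault(c - min_col, {})[r - min_row] = color: the net effect of setdefault-then-assign
  -- on the nested dict is exactly Dict.modify (exact, incl. key order)
  let byrow : PySem.Dict Int (PySem.Dict Int Int) :=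
    object.foldl (fun d p =>
        d.modify (p.2.1 - min_col) PySem.Dict.empty
          (fun rd => rd.insert (p.2.2 - min_row) p.1))
      PySem.Dict.empty
  -- row = [12] * width ([] for width ≤ 0, as in Python); then the guarded row[j] = color patches
  (PySem.List.pyRange 0 height 1).map (fun i =>
    ((byrow.getD i PySem.Dict.empty).items).foldl
      (fun (row : List Int) (kv : Int × Int) =>
        if 0 ≤ kv.1 ∧ kv.1 < width then row.set kv.1.toNat kv.2 else row)
      (List.replicate width.toNat 12))

-- ===== PRECONDITION & SPEC =====
-- Pre_ excludes the inputs on which some axis has all coordinates ≥ the 100 sentinel without being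
-- all equal: there A's sentinel reset mis-shifts by the axis maximum M and either raises IndexError
-- (spread > 1) or returns a grid in which the M-1 entries wrap via Python's negative indexing into
-- the single row/column (spread = 1), an artefact of A's implementation; B returns the grid with
-- those out-of-grid entries dropped.
def Pre_object_colcoord_to_colorgrid (object : List (Int × (Int × Int))) : Prop :=
  ((∃ p ∈ object, p.2.1 < 100) ∨ ∀ p ∈ object, ∀ q ∈ object, p.2.1 = q.2.1) ∧
  ((∃ p ∈ object, p.2.2 < 100) ∨ ∀ p ∈ object, ∀ q ∈ object, p.2.2 = q.2.2)
instance (object : List (Int × (Int × Int))) : Decidable (Pre_object_colcoord_to_colorgrid object) := by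
  unfold Pre_object_colcoord_to_colorgrid; infer_instance

def pvWitness_object_colcoord_to_colorgrid : (List (Int × (Int × Int))) := [(1, (0, 0))]

def Spec_object_colcoord_to_colorgrid (object : List (Int × (Int × Int))) (out : List (List Int)) : Prop :=
  out = object_colcoord_to_colorgrid_alt object
instance (object : List (Int × (Int × Int))) (out : List (List Int)) : Decidable (Spec_object_colcoord_to_colorgrid object out) := by
  unfold Spec_object_colcoord_to_colorgrid; infer_instance

-- ===== CLAIM (what is proved, stated in full; the proofs are below) =====
def Claim_equal_object_colcoord_to_colorgrid : Prop := ∀ (object : List (Int × (Int × Int))), Dom_object_colcoord_to_colorgrid object → Pre_object_colcoord_to_colorgrid object → Spec_object_colcoord_to_colorgrid object (object_colcoord_to_colorgrid object)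
-- ===== LEMMAS AND PROOFS =====

-- running max over an axis (sentinel start 0), as both programs compute it
def pvMaxCol (object : List (Int × (Int × Int))) : Int := (object.map (fun o => o.2.1)).foldl max 0
def pvMaxRow (object : List (Int × (Int × Int))) : Int := (object.map (fun o => o.2.2)).foldl max 0

-- the grid [[f i j for j in range W] for i in range H]
def pvRangeGrid (H W : Int) (f : Int → Int → Int) : List (List Int) :=
  (PySem.List.pyRange 0 H 1).map (fun i => (PySem.List.pyRange 0 W 1).map (fun j => f i j))

def pvUpd (f : Int → Int → Int) (a b v : Int) : Int → Int → Int :=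
  fun i j => if i = a ∧ j = b then v else f i j

-- the shift used by both programs on one axis (min with the sentinels applied)
def pvCm (object : List (Int × (Int × Int))) : Int :=
  if (object.map (fun o => o.2.1)).foldl min 100 = 100 then pvMaxCol object
  else (object.map (fun o => o.2.1)).foldl min 100
def pvRm (object : List (Int × (Int × Int))) : Int :=
  if (object.map (fun o => o.2.2)).foldl min 100 = 100 then pvMaxRow object
  else (object.map (fun o => o.2.2)).foldl min 100

theorem pvSetCell_rangeGrid (H W : Int) (f : Int → Int → Int) (a b v : Int)
    (ha0 : 0 ≤ a) (haH : a < H) (hb0 : 0 ≤ b) (hbW : b < W) :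
    pySetCell (pvRangeGrid H W f) a b v = some (pvRangeGrid H W (pvUpd f a b v)) := by
  have hlen : (pvRangeGrid H W f).length = H.toNat := by
    simp [pvRangeGrid, PySem.List.length_pyRange_one]
  have hget : PySem.List.pyGet? (pvRangeGrid H W f) a
      = some ((PySem.List.pyRange 0 W 1).map (fun j => f a j)) := by
    rw [PySem.List.pyGet?_eq_some_getElem _ ha0 (by rw [hlen]; omega)]
    simp only [pvRangeGrid, List.getElem_map, PySem.List.getElem_pyRange_one]
    have hcast : (0:Int) + (a.toNat : Int) = a := by omega
    rw [hcast]
  have hrowlen : ((PySem.List.pyRange 0 W 1).map (fun j => f a j)).length = W.toNat := by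
    simp [PySem.List.length_pyRange_one]
  have hset : PySem.List.pySet? ((PySem.List.pyRange 0 W 1).map (fun j => f a j)) b v
      = some ((PySem.List.pyRange 0 W 1).map (fun j => pvUpd f a b v a j)) := by
    have hb : b = ((b.toNat : Nat) : Int) := by omega
    rw [hb, PySem.List.pySet?_natCast _ _ _ (by rw [hrowlen]; omega)]
    congr 1
    apply List.ext_getElem
    · simp
    · intro k hk1 hk2
      simp only [List.getElem_set, List.getElem_map, PySem.List.getElem_pyRange_one, pvUpd]
      split_ifs with h1 h2 h2
      · rfl
      · exact absurd (by simp; omega) h2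
      · simp at h2; omega
      · rfl
  have hsetg : PySem.List.pySet? (pvRangeGrid H W f) a ((PySem.List.pyRange 0 W 1).map (fun j => pvUpd f a b v a j))
      = some (pvRangeGrid H W (pvUpd f a b v)) := by
    have ha : a = ((a.toNat : Nat) : Int) := by omega
    rw [ha, PySem.List.pySet?_natCast _ _ _ (by rw [hlen]; omega)]
    congr 1
    apply List.ext_getElem
    · simp [pvRangeGrid, PySem.List.length_pyRange_one]
    · intro k hk1 hk2
      simp only [pvRangeGrid, List.getElem_set, List.getElem_map, PySem.List.getElem_pyRange_one]
      by_cases hka : a.toNat = k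
      · rw [if_pos hka]
        have hcast : ((a.toNat : Nat) : Int) = 0 + (k : Int) := by omega
        rw [hcast]
      · rw [if_neg hka]
        apply List.map_congr_left
        intro j hj
        exact (if_neg (by rintro ⟨h, -⟩; omega)).symm
  simp only [pySetCell, hget, hset, hsetg]

theorem pvScatter_rangeGrid (cm rm H W : Int) (l : List (Int × (Int × Int))) :
    ∀ (f : Int → Int → Int),
    (∀ p ∈ l, 0 ≤ p.2.1 - cm ∧ p.2.1 - cm < H ∧ 0 ≤ p.2.2 - rm ∧ p.2.2 - rm < W) →
    l.foldl (fun acc p => acc.bind (fun g => pySetCell g (p.2.1 - cm) (p.2.2 - rm) p.1))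
        (some (pvRangeGrid H W f))
      = some (pvRangeGrid H W
          (l.foldl (fun f p => pvUpd f (p.2.1 - cm) (p.2.2 - rm) p.1) f)) := by
  induction l with
  | nil => intro f _; rfl
  | cons p t ih =>
    intro f hok
    obtain ⟨h1, h2, h3, h4⟩ := hok p (List.mem_cons_self)
    simp only [List.foldl_cons, Option.bind_some,
      pvSetCell_rangeGrid H W f _ _ _ h1 h2 h3 h4]
    exact ih _ (fun q hq => hok q (List.mem_cons_of_mem _ hq))

-- every inner dict of the byrow structure keeps duplicate-free keys
theorem pvByrow_nodup (cm rm : Int) (l : List (Int × (Int × Int))) :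
    ∀ (byrow : PySem.Dict Int (PySem.Dict Int Int)),
    (∀ i, (byrow.getD i PySem.Dict.empty).keys.Nodup) →
    ∀ i, ((l.foldl (fun d p =>
        d.modify (p.2.1 - cm) PySem.Dict.empty (fun rd => rd.insert (p.2.2 - rm) p.1)) byrow).getD
          i PySem.Dict.empty).keys.Nodup := by
  induction l with
  | nil => intro byrow h i; exact h i
  | cons p t ih =>
    intro byrow h i
    simp only [List.foldl_cons]
    apply ih
    intro i'
    rw [PySem.Dict.getD_modify]
    split_ifs with h1
    · exact PySem.Dict.nodup_keys_insert _ _ _ (h _)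
    · exact h i'

-- the functional grid agrees pointwise with B's nested byrow dict
theorem pvUpd_eq_dict (cm rm : Int) (l : List (Int × (Int × Int))) :
    ∀ (f : Int → Int → Int) (byrow : PySem.Dict Int (PySem.Dict Int Int)),
    (∀ i j, f i j = (byrow.getD i PySem.Dict.empty).getD j 12) →
    ∀ i j, (l.foldl (fun f p => pvUpd f (p.2.1 - cm) (p.2.2 - rm) p.1) f) i j
      = ((l.foldl (fun d p =>
          d.modify (p.2.1 - cm) PySem.Dict.empty (fun rd => rd.insert (p.2.2 - rm) p.1)) byrow).getD
            i PySem.Dict.empty).getD j 12 := by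
  induction l with
  | nil => intro f byrow h i j; exact h i j
  | cons p t ih =>
    intro f byrow h i j
    simp only [List.foldl_cons]
    apply ih
    intro i' j'
    rw [PySem.Dict.getD_modify]
    by_cases h1 : i' = p.2.1 - cm
    · rw [if_pos h1, PySem.Dict.getD_insert]
      simp only [pvUpd]
      by_cases h2 : j' = p.2.2 - rm
      · rw [if_pos (⟨h1, h2⟩ : _ ∧ _), if_pos h2]
      · rw [if_neg (fun hc => h2 hc.2), if_neg h2, h1]
        exact h _ j'
    · rw [if_neg h1]
      simp only [pvUpd]
      rw [if_neg (fun hc => h1 hc.1)]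
      exact h i' j'

-- Dict.get? is first-match lookup on the items list
theorem pvGet?_eq_find? {ν : Type} (items : List (Int × ν)) (k : Int) :
    (PySem.Dict.mk items).get? k = (items.find? (fun kv => kv.1 == k)).map Prod.snd := by
  induction items with
  | nil => rfl
  | cons kv t ih =>
    rw [show PySem.Dict.mk (kv :: t) = PySem.Dict.mk ((kv.1, kv.2) :: t) from rfl,
        PySem.Dict.get?_mk_cons, List.find?]
    by_cases h : kv.1 == k
    · rw [if_pos h, h]; rfl
    · rw [if_neg (by simpa using h)]
      rw [show (kv.1 == k) = false from by simpa using h]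
      exact ih

-- patching [12]*W from a duplicate-free key/value list, read back cell by cell
theorem pvEmit_len (W : Int) (ps : List (Int × Int)) : ∀ (row : List Int),
    (ps.foldl (fun row kv => if 0 ≤ kv.1 ∧ kv.1 < W then row.set kv.1.toNat kv.2 else row)
      row).length = row.length := by
  induction ps with
  | nil => intro row; rfl
  | cons kv t ih =>
    intro row
    simp only [List.foldl_cons]
    rw [ih]
    split_ifs <;> simp

theorem pvEmit_aux (W : Int) : ∀ (ps : List (Int × Int)) (row : List Int),
    row.length = W.toNat → (ps.map Prod.fst).Nodup →
    ∀ (k : Nat), k < W.toNat →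
    (ps.foldl (fun row kv => if 0 ≤ kv.1 ∧ kv.1 < W then row.set kv.1.toNat kv.2 else row)
        row)[k]?
      = match ps.find? (fun kv => kv.1 == (k : Int)) with
        | some kv => some kv.2
        | none => row[k]? := by
  intro ps
  induction ps with
  | nil => intro row _ _ k _; rfl
  | cons kv t ih =>
    intro row hlen hnd k hk
    simp only [List.map_cons, List.nodup_cons] at hnd
    simp only [List.foldl_cons, List.find?]
    by_cases hkeq : kv.1 = (k : Int)
    · have hg : 0 ≤ kv.1 ∧ kv.1 < W := by constructor <;> omega
      rw [if_pos hg]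
      rw [ih _ (by rw [List.length_set]; exact hlen) hnd.2 k hk]
      have hfind : t.find? (fun kv => kv.1 == (k : Int)) = none := by
        apply List.find?_eq_none.2
        intro x hx
        simp only [beq_iff_eq]
        intro habs
        exact hnd.1 (by rw [hkeq, ← habs]; exact List.mem_map_of_mem hx)
      rw [hfind]
      rw [show (kv.1 == (k : Int)) = true from by simpa using hkeq]
      have : kv.1.toNat = k := by omega
      rw [this]
      exact List.getElem?_set_self (by omega)
    · rw [show (kv.1 == (k : Int)) = false from by simpa using hkeq]
      by_cases hg : 0 ≤ kv.1 ∧ kv.1 < W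
      · rw [if_pos hg]
        rw [ih _ (by rw [List.length_set]; exact hlen) hnd.2 k hk]
        have : (row.set kv.1.toNat kv.2)[k]? = row[k]? :=
          List.getElem?_set_ne (by omega)
        rw [this]
      · rw [if_neg hg]
        exact ih _ hlen hnd.2 k hk

-- one emitted row equals the cell-by-cell read of its dict
theorem pvRow_eq (W : Int) (rowd : PySem.Dict Int Int) (hnd : rowd.keys.Nodup) :
    rowd.items.foldl
        (fun row kv => if 0 ≤ kv.1 ∧ kv.1 < W then row.set kv.1.toNat kv.2 else row)
        (List.replicate W.toNat 12)
      = (PySem.List.pyRange 0 W 1).map (fun j => rowd.getD j 12) := by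
  apply List.ext_getElem?
  intro k
  by_cases hk : k < W.toNat
  · rw [pvEmit_aux W rowd.items (List.replicate W.toNat 12) (by simp) hnd k hk]
    have hrhs : ((PySem.List.pyRange 0 W 1).map (fun j => rowd.getD j 12))[k]?
        = some (rowd.getD (0 + (k : Int)) 12) := by
      rw [List.getElem?_map, PySem.List.getElem?_pyRange_one,
          if_pos (show k < ((W : Int) - 0).toNat by omega)]
      rfl
    rw [hrhs]
    have hget : rowd.getD (0 + (k : Int)) 12
        = ((rowd.items.find? (fun kv => kv.1 == (k : Int))).map Prod.snd).getD 12 := by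
      rw [PySem.Dict.getD_eq_get?_getD,
          show rowd = PySem.Dict.mk rowd.items from (PySem.Dict.ext_iff.mpr rfl),
          pvGet?_eq_find?]
      norm_num
    rw [hget, List.getElem?_replicate_of_lt hk]
    cases rowd.items.find? (fun kv => kv.1 == (k : Int)) <;> rfl
  · rw [List.getElem?_eq_none (by rw [pvEmit_len]; simp; omega),
        List.getElem?_eq_none (by simp [PySem.List.length_pyRange_one]; omega)]

theorem pvIteMax (m v : Int) : (if v > m then v else m) = max m v := by
  split_ifs <;> omega

theorem pvIteMin (m v : Int) : (if v < m then v else m) = min m v := by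
  split_ifs <;> omega

-- A's four running updates compute the foldl max/min of each coordinate list
theorem pvBoundsFold (l : List (Int × (Int × Int))) : ∀ (st : Int × Int × Int × Int),
    l.foldl (fun (st : Int × Int × Int × Int) p =>
        (if p.2.1 > st.1 then p.2.1 else st.1,
         if p.2.2 > st.2.1 then p.2.2 else st.2.1,
         if p.2.1 < st.2.2.1 then p.2.1 else st.2.2.1,
         if p.2.2 < st.2.2.2 then p.2.2 else st.2.2.2)) st
      = ((l.map (fun o => o.2.1)).foldl max st.1,
         (l.map (fun o => o.2.2)).foldl max st.2.1,
         (l.map (fun o => o.2.1)).foldl min st.2.2.1,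
         (l.map (fun o => o.2.2)).foldl min st.2.2.2) := by
  induction l with
  | nil => intro st; rfl
  | cons p t ih =>
    intro st
    simp only [List.foldl_cons, List.map_cons]
    rw [pvIteMax, pvIteMax, pvIteMin, pvIteMin]
    exact ih _

theorem pvFoldlMin_le (t : List Int) (a : Int) :
    t.foldl min a ≤ a ∧ ∀ y ∈ t, t.foldl min a ≤ y := by
  induction t generalizing a with
  | nil => simp
  | cons x t ih =>
    simp only [List.foldl_cons, List.mem_cons]
    refine ⟨le_trans (ih (min a x)).1 (by omega), ?_⟩
    rintro y (rfl | hy)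
    · exact le_trans (ih (min a y)).1 (by omega)
    · exact (ih (min a x)).2 y hy

theorem pvFoldlMax_mem (t : List Int) : ∀ a : Int, t.foldl max a = a ∨ t.foldl max a ∈ t := by
  induction t with
  | nil => intro a; left; rfl
  | cons x t ih =>
    intro a
    simp only [List.foldl_cons, List.mem_cons]
    rcases ih (max a x) with h | h
    · rcases max_choice a x with hc | hc <;> rw [h, hc]
      · left; rfl
      · right; left; rfl
    · right; right; exact h

theorem pvFoldlMin_eq (t : List Int) (a : Int) (h : ∀ y ∈ t, a ≤ y) :
    t.foldl min a = a := by
  induction t with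
  | nil => rfl
  | cons x t ih =>
    simp only [List.foldl_cons]
    rw [min_eq_left (h x (List.mem_cons_self))]
    exact ih (fun y hy => h y (List.mem_cons_of_mem _ hy))

-- A's value, written with list folds and the pvCm/pvRm shifts
theorem pvA_eq (object : List (Int × (Int × Int))) :
    object_colcoord_to_colorgrid object =
      (object.foldl
        (fun acc p => acc.bind (fun g =>
          pySetCell g (p.2.1 - pvCm object) (p.2.2 - pvRm object) p.1))
        (some (pvRangeGrid (pvMaxCol object - pvCm object + 1)
                           (pvMaxRow object - pvRm object + 1)
                           (fun _ _ => (12 : Int))))).getD [] := by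
  simp only [object_colcoord_to_colorgrid]
  rw [PySem.List.foldl_pyRange_zero_pyGetD object ((0:Int), ((0:Int), (0:Int)))
    (fun (st : Int × Int × Int × Int) (p : Int × (Int × Int)) =>
      (if p.2.1 > st.1 then p.2.1 else st.1,
       if p.2.2 > st.2.1 then p.2.2 else st.2.1,
       if p.2.1 < st.2.2.1 then p.2.1 else st.2.2.1,
       if p.2.2 < st.2.2.2 then p.2.2 else st.2.2.2))
    ((0:Int), (0:Int), (100:Int), (100:Int))]
  rw [pvBoundsFold]
  have hmove : ∀ m : Int, (if m = 0 then (0:Int) else m) = m := by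
    intro m; split_ifs <;> omega
  simp only [hmove]
  have hcm : (if List.foldl min 100 (List.map (fun o => o.2.1) object) = 100
      then List.foldl max 0 (List.map (fun o => o.2.1) object)
      else List.foldl min 100 (List.map (fun o => o.2.1) object)) = pvCm object := rfl
  have hrm : (if List.foldl min 100 (List.map (fun o => o.2.2) object) = 100
      then List.foldl max 0 (List.map (fun o => o.2.2) object)
      else List.foldl min 100 (List.map (fun o => o.2.2) object)) = pvRm object := rfl
  simp only [hcm, hrm]
  rw [PySem.List.foldl_pyRange_zero_pyGetD object ((0:Int), ((0:Int), (0:Int)))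
    (fun (acc : Option (List (List Int))) (p : Int × (Int × Int)) =>
      acc.bind fun g => pySetCell g (p.2.1 - pvCm object) (p.2.2 - pvRm object) p.1)]
  rfl

-- B's value, as the same functional grid read off its nested byrow dict
theorem pvB_eq (object : List (Int × (Int × Int))) :
    object_colcoord_to_colorgrid_alt object =
      pvRangeGrid (pvMaxCol object - pvCm object + 1) (pvMaxRow object - pvRm object + 1)
        (fun i j =>
          ((object.foldl
              (fun d p => d.modify (p.2.1 - pvCm object) PySem.Dict.empty
                (fun rd => rd.insert (p.2.2 - pvRm object) p.1))
              PySem.Dict.empty).getD i PySem.Dict.empty).getD j 12) := by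
  simp only [object_colcoord_to_colorgrid_alt]
  rw [PySem.List.max?_id_cons, PySem.List.max?_id_cons,
      PySem.List.min?_id_cons, PySem.List.min?_id_cons]
  simp only [Option.getD_some]
  have hcm : (if List.foldl min 100 (List.map (fun o => o.2.1) object) = 100
      then List.foldl max 0 (List.map (fun o => o.2.1) object)
      else List.foldl min 100 (List.map (fun o => o.2.1) object)) = pvCm object := rfl
  have hrm : (if List.foldl min 100 (List.map (fun o => o.2.2) object) = 100
      then List.foldl max 0 (List.map (fun o => o.2.2) object)
      else List.foldl min 100 (List.map (fun o => o.2.2) object)) = pvRm object := rfl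
  simp only [hcm, hrm]
  simp only [pvRangeGrid]
  apply List.map_congr_left
  intro i _
  exact pvRow_eq _ _
    (pvByrow_nodup (pvCm object) (pvRm object) object PySem.Dict.empty
      (fun i' => by rw [PySem.Dict.getD_empty, PySem.Dict.keys_empty]; exact List.nodup_nil) i)

-- inside Pre_ every shifted coordinate is a valid grid index
theorem pvKeyOK_col (object : List (Int × (Int × Int)))
    (hpre : (∃ p ∈ object, p.2.1 < 100) ∨ ∀ p ∈ object, ∀ q ∈ object, p.2.1 = q.2.1) :
    ∀ p ∈ object, 0 ≤ p.2.1 - pvCm object ∧ p.2.1 - pvCm object < pvMaxCol object - pvCm object + 1 := by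
  intro p hp
  have hpc : p.2.1 ∈ object.map (fun o => o.2.1) := List.mem_map_of_mem hp
  have hle : p.2.1 ≤ pvMaxCol object :=
    (PySem.List.le_foldl_max (object.map (fun o => o.2.1)) 0).2 _ hpc
  by_cases hex : ∃ q ∈ object, q.2.1 < 100
  · obtain ⟨q, hq, hq100⟩ := hex
    have hm0q : (object.map (fun o => o.2.1)).foldl min 100 ≤ q.2.1 :=
      (pvFoldlMin_le _ 100).2 _ (List.mem_map_of_mem hq)
    have hm0p : (object.map (fun o => o.2.1)).foldl min 100 ≤ p.2.1 :=
      (pvFoldlMin_le _ 100).2 _ hpc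
    have hcm : pvCm object = (object.map (fun o => o.2.1)).foldl min 100 := by
      unfold pvCm; rw [if_neg (by omega)]
    omega
  · push Not at hex
    have hall : ∀ q ∈ object, 100 ≤ q.2.1 := fun q hq => hex q hq
    have heq : ∀ r ∈ object, ∀ q ∈ object, r.2.1 = q.2.1 := by
      rcases hpre with h | h
      · obtain ⟨q, hq, hq100⟩ := h
        exact absurd (hall q hq) (by omega)
      · exact h
    have hm0 : (object.map (fun o => o.2.1)).foldl min 100 = 100 := by
      apply pvFoldlMin_eq
      intro y hy
      obtain ⟨q, hq, rfl⟩ := List.mem_map.1 hy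
      exact hall q hq
    have hcm : pvCm object = pvMaxCol object := by
      unfold pvCm; rw [if_pos hm0]
    have hmax : p.2.1 = pvMaxCol object := by
      rcases pvFoldlMax_mem (object.map (fun o => o.2.1)) 0 with hm | hm
      · have := hall p hp
        unfold pvMaxCol
        unfold pvMaxCol at hle
        omega
      · obtain ⟨q, hq, hqe⟩ := List.mem_map.1 hm
        unfold pvMaxCol
        rw [← hqe]
        exact heq p hp q hq
    omega

theorem pvKeyOK_row (object : List (Int × (Int × Int)))
    (hpre : (∃ p ∈ object, p.2.2 < 100) ∨ ∀ p ∈ object, ∀ q ∈ object, p.2.2 = q.2.2) :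
    ∀ p ∈ object, 0 ≤ p.2.2 - pvRm object ∧ p.2.2 - pvRm object < pvMaxRow object - pvRm object + 1 := by
  intro p hp
  have hpc : p.2.2 ∈ object.map (fun o => o.2.2) := List.mem_map_of_mem hp
  have hle : p.2.2 ≤ pvMaxRow object :=
    (PySem.List.le_foldl_max (object.map (fun o => o.2.2)) 0).2 _ hpc
  by_cases hex : ∃ q ∈ object, q.2.2 < 100
  · obtain ⟨q, hq, hq100⟩ := hex
    have hm0q : (object.map (fun o => o.2.2)).foldl min 100 ≤ q.2.2 :=
      (pvFoldlMin_le _ 100).2 _ (List.mem_map_of_mem hq)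
    have hm0p : (object.map (fun o => o.2.2)).foldl min 100 ≤ p.2.2 :=
      (pvFoldlMin_le _ 100).2 _ hpc
    have hrm : pvRm object = (object.map (fun o => o.2.2)).foldl min 100 := by
      unfold pvRm; rw [if_neg (by omega)]
    omega
  · push Not at hex
    have hall : ∀ q ∈ object, 100 ≤ q.2.2 := fun q hq => hex q hq
    have heq : ∀ r ∈ object, ∀ q ∈ object, r.2.2 = q.2.2 := by
      rcases hpre with h | h
      · obtain ⟨q, hq, hq100⟩ := h
        exact absurd (hall q hq) (by omega)
      · exact h
    have hm0 : (object.map (fun o => o.2.2)).foldl min 100 = 100 := by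
      apply pvFoldlMin_eq
      intro y hy
      obtain ⟨q, hq, rfl⟩ := List.mem_map.1 hy
      exact hall q hq
    have hrm : pvRm object = pvMaxRow object := by
      unfold pvRm; rw [if_pos hm0]
    have hmax : p.2.2 = pvMaxRow object := by
      rcases pvFoldlMax_mem (object.map (fun o => o.2.2)) 0 with hm | hm
      · have := hall p hp
        unfold pvMaxRow
        unfold pvMaxRow at hle
        omega
      · obtain ⟨q, hq, hqe⟩ := List.mem_map.1 hm
        unfold pvMaxRow
        rw [← hqe]
        exact heq p hp q hq
    omega

-- ===== VERDICT (by name: the statement is the Claim_ definition above) =====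
theorem object_colcoord_to_colorgrid_spec : Claim_equal_object_colcoord_to_colorgrid := by
  intro object _hdom hpre
  unfold Pre_object_colcoord_to_colorgrid at hpre
  obtain ⟨hpc, hpr⟩ := hpre
  unfold Spec_object_colcoord_to_colorgrid
  rw [pvA_eq, pvB_eq]
  rw [pvScatter_rangeGrid (pvCm object) (pvRm object) _ _ object (fun _ _ => 12)
    (fun p hp => by
      obtain ⟨a, b⟩ := pvKeyOK_col object hpc p hp
      obtain ⟨c, d⟩ := pvKeyOK_row object hpr p hp
      exact ⟨a, b, c, d⟩)]
  rw [Option.getD_some]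
  simp only [pvRangeGrid]
  apply List.map_congr_left
  intro i _
  apply List.map_congr_left
  intro j _
  exact pvUpd_eq_dict (pvCm object) (pvRm object) object (fun _ _ => 12) PySem.Dict.empty
    (fun i j => by rw [PySem.Dict.getD_empty, PySem.Dict.getD_empty]) i j
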